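-- pv_equiv track=rewrite | github.com/MrBrantCode/unitest_baseline | mut_generate/mist_train_cf/cf_79829/solution.py | prime_pairs
-- ===== SOURCE A (Python) =====
-- import math
--
-- def prime_pairs(Y):
--     """
--     This function generates all pairs of positive integers (A, B)
--     where A and B are coprime and their product equals Y.
--
--     Args:
--         Y (int): A prime number.
--
--     Returns:
--         list: A list of tuples, where each tuple contains a pair of coprime numbers.
--     """
--     pairs = []
--     for A in range(1, Y+1):
--         if Y % A == 0:
--             B = Y // A
--             if math.gcd(A, B) == 1:
--                 pairs.append((A, B))
--     return pairs
-- ===== SOURCE B (Python) =====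
-- import math
--
-- def prime_pairs(Y):
--     # Enumerate divisors only up to isqrt(Y); each small divisor d yields the
--     # pair (d, Y//d) and (unless d == Y//d) the mirrored pair (Y//d, d).
--     if Y <= 0:
--         return []
--     small = []
--     large = []
--     for d in range(1, math.isqrt(Y) + 1):
--         if Y % d == 0:
--             b = Y // d
--             if math.gcd(d, b) == 1:
--                 small.append((d, b))
--                 if d != b:
--                     large.append((b, d))
--     return small + large[::-1]
-- ===== Notes on version B (the rewrite author's own statement) =====
-- stated objective: faster
-- what changed: B enumerates divisors only up to isqrt(Y), emitting each coprime pair and its mirror, instead of A's trial of every A in 1..Y.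
import Mathlib
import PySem

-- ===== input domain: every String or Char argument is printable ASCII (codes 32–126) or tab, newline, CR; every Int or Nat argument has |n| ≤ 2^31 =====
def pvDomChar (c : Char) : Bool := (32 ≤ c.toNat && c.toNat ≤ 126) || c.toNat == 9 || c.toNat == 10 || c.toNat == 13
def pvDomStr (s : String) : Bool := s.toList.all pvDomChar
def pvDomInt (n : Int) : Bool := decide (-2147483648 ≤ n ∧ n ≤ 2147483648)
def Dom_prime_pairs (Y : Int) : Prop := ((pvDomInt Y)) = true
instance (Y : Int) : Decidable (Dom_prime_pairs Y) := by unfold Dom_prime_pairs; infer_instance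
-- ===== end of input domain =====

-- B enumerates divisors only up to isqrt(Y) and mirrors each coprime pair, instead of trying every A in 1..Y (objective: faster).


-- ===== PORT A =====
-- math.gcd on the positive ints reached here is Int.gcd
def prime_pairs (Y : Int) : List (Int × Int) :=
  (PySem.List.pyRange 1 (Y + 1) 1).foldl
    (fun pairs A =>
      if PySem.Int.mod Y A = 0 then
        let B := PySem.Int.floordiv Y A
        if Int.gcd A B = 1 then pairs ++ [(A, B)] else pairs
      else pairs) []

-- ===== PORT B =====
-- math.isqrt(Y) for Y ≥ 0 is exactly Nat.sqrt (floor square root); large[::-1] is List.reverse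
def prime_pairs_alt (Y : Int) : List (Int × Int) :=
  if Y ≤ 0 then []
  else
    let st := (PySem.List.pyRange 1 ((Nat.sqrt Y.toNat : Int) + 1) 1).foldl
      (fun (st : List (Int × Int) × List (Int × Int)) d =>
        if PySem.Int.mod Y d = 0 then
          let b := PySem.Int.floordiv Y d
          if Int.gcd d b = 1 then
            (st.1 ++ [(d, b)], if d ≠ b then st.2 ++ [(b, d)] else st.2)
          else st
        else st) ([], [])
    st.1 ++ st.2.reverse

-- ===== PRECONDITION & SPEC =====
def Spec_prime_pairs (Y : Int) (out : List (Int × Int)) : Prop := out = prime_pairs_alt Y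
instance (Y : Int) (out : List (Int × Int)) : Decidable (Spec_prime_pairs Y out) := by unfold Spec_prime_pairs; infer_instance

-- ===== CLAIM (what is proved, stated in full; the proofs are below) =====
def Claim_equal_prime_pairs : Prop := ∀ (Y : Int), Dom_prime_pairs Y → Spec_prime_pairs Y (prime_pairs Y)

-- ===== LEMMAS AND PROOFS =====

-- the divisor-and-coprime test both programs apply, and the cofactor
def ppCond (Y d : Int) : Bool :=
  decide (PySem.Int.mod Y d = 0) && decide (Int.gcd d (PySem.Int.floordiv Y d) = 1)
def ppCof (Y d : Int) : Int := PySem.Int.floordiv Y d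
def ppCondL (Y d : Int) : Bool := ppCond Y d && decide (d ≠ ppCof Y d)
def ppS (Y : Int) : Int := (Nat.sqrt Y.toNat : Int)

lemma prime_pairs_eq_filter (Y : Int) :
    prime_pairs Y =
      ((PySem.List.pyRange 1 (Y + 1) 1).filter (ppCond Y)).map (fun d => (d, ppCof Y d)) := by
  unfold prime_pairs
  have hf : (fun (pairs : List (Int × Int)) A =>
      if PySem.Int.mod Y A = 0 then
        let B := PySem.Int.floordiv Y A
        if Int.gcd A B = 1 then pairs ++ [(A, B)] else pairs
      else pairs) =
      (fun (pairs : List (Int × Int)) A =>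
        if ppCond Y A then pairs ++ [(A, ppCof Y A)] else pairs) := by
    funext pairs A
    by_cases h1 : PySem.Int.mod Y A = 0 <;>
      by_cases h2 : Int.gcd A (PySem.Int.floordiv Y A) = 1 <;>
        simp [h1, h2, ppCond, ppCof]
  rw [hf, PySem.List.foldl_append_if]
  simp

set_option maxRecDepth 4000 in
lemma bfold (Y : Int) (l : List Int) (a1 a2 : List (Int × Int)) :
    l.foldl
      (fun (st : List (Int × Int) × List (Int × Int)) d =>
        if PySem.Int.mod Y d = 0 then
          let b := PySem.Int.floordiv Y d
          if Int.gcd d b = 1 then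
            (st.1 ++ [(d, b)], if d ≠ b then st.2 ++ [(b, d)] else st.2)
          else st
        else st) (a1, a2) =
      (a1 ++ (l.filter (ppCond Y)).map (fun d => (d, ppCof Y d)),
       a2 ++ (l.filter (ppCondL Y)).map (fun d => (ppCof Y d, d))) := by
  induction l generalizing a1 a2 with
  | nil => simp
  | cons d l ih =>
    rw [List.foldl_cons, List.filter_cons, List.filter_cons]
    by_cases h1 : PySem.Int.mod Y d = 0
    · by_cases h2 : Int.gcd d (PySem.Int.floordiv Y d) = 1
      · have hc : ppCond Y d = true := by
          simp [ppCond, h1, h2]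
        by_cases h3 : d = PySem.Int.floordiv Y d
        · have hcl : ppCondL Y d = false := by
            simp [ppCondL, ppCof, ← h3, hc]
          rw [if_pos h1]
          simp only [if_pos h2, if_neg (by simp [← h3] : ¬ d ≠ PySem.Int.floordiv Y d)]
          rw [ih]
          simp [hc, hcl, ppCof, List.append_assoc]
        · have hcl : ppCondL Y d = true := by
            simp [ppCondL, ppCof, h3, hc]
          rw [if_pos h1]
          simp only [if_pos h2, if_pos (h3 : d ≠ PySem.Int.floordiv Y d)]
          rw [ih]
          simp [hc, hcl, ppCof, List.append_assoc]
      · have hc : ppCond Y d = false := by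
          simp [ppCond, h1, h2]
        have hcl : ppCondL Y d = false := by
          simp [ppCondL, hc]
        rw [if_pos h1]
        simp only [if_neg h2]
        rw [ih]
        simp [hc, hcl]
    · have hc : ppCond Y d = false := by
        simp [ppCond, h1]
      have hcl : ppCondL Y d = false := by
        simp [ppCondL, hc]
      rw [if_neg h1, ih]
      simp [hc, hcl]

lemma prime_pairs_alt_eq_filter (Y : Int) (hY : 0 < Y) :
    prime_pairs_alt Y =
      ((PySem.List.pyRange 1 (ppS Y + 1) 1).filter (ppCond Y)).map (fun d => (d, ppCof Y d)) ++
      (((PySem.List.pyRange 1 (ppS Y + 1) 1).filter (ppCondL Y)).map (fun d => (ppCof Y d, d))).reverse := by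
  unfold prime_pairs_alt
  rw [if_neg (by omega), bfold]
  simp [ppS]

-- ── arithmetic facts ──
lemma cof_eq (Y d : Int) (hd : 0 < d) : PySem.Int.floordiv Y d = Y / d :=
  PySem.Int.floordiv_eq_ediv_of_pos (a := Y) hd

lemma cond_iff (Y d : Int) (hd : 0 < d) :
    ppCond Y d = true ↔ d ∣ Y ∧ Int.gcd d (Y / d) = 1 := by
  rw [ppCond, Bool.and_eq_true, decide_eq_true_iff, decide_eq_true_iff,
    PySem.Int.mod_eq_zero_iff_dvd, PySem.Int.floordiv_eq_ediv_of_pos hd]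

lemma le_s_iff (Y d : Int) (hY : 0 < Y) (hd : 0 ≤ d) : d ≤ ppS Y ↔ d * d ≤ Y := by
  obtain ⟨m, rfl⟩ := Int.eq_ofNat_of_zero_le hd
  obtain ⟨n, rfl⟩ := Int.eq_ofNat_of_zero_le hY.le
  have hn : ((n : Int)).toNat = n := by omega
  simp only [ppS, hn]
  constructor
  · intro h
    have hm : m ≤ Nat.sqrt n := by exact_mod_cast h
    exact_mod_cast Nat.le_sqrt.mp hm
  · intro h
    have hmm : m * m ≤ n := by exact_mod_cast h
    exact_mod_cast Nat.le_sqrt.mpr hmm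

lemma cof_pos (Y d : Int) (hY : 0 < Y) (hd : 0 < d) (hdvd : d ∣ Y) : 0 < Y / d := by
  obtain ⟨e, rfl⟩ := hdvd
  rw [Int.mul_ediv_cancel_left _ hd.ne']
  nlinarith

lemma cof_dvd (Y d : Int) (hd : 0 < d) (hdvd : d ∣ Y) : Y / d ∣ Y := by
  obtain ⟨e, rfl⟩ := hdvd
  rw [Int.mul_ediv_cancel_left _ hd.ne']
  exact ⟨d, mul_comm d e⟩

lemma cof_cof (Y d : Int) (hY : 0 < Y) (hd : 0 < d) (hdvd : d ∣ Y) : Y / (Y / d) = d := by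
  obtain ⟨e, rfl⟩ := hdvd
  have he : e ≠ 0 := by rintro rfl; simp at hY
  rw [Int.mul_ediv_cancel_left _ hd.ne', Int.mul_ediv_cancel _ he]


def ppSmall (Y : Int) : List (Int × Int) :=
  ((PySem.List.pyRange 1 (ppS Y + 1) 1).filter (ppCond Y)).map (fun d => (d, ppCof Y d))
def ppLarge (Y : Int) : List (Int × Int) :=
  ((PySem.List.pyRange 1 (ppS Y + 1) 1).filter (ppCondL Y)).map (fun d => (ppCof Y d, d))
def ppAll (Y : Int) : List (Int × Int) :=
  ((PySem.List.pyRange 1 (Y + 1) 1).filter (ppCond Y)).map (fun d => (d, ppCof Y d))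

lemma cof_anti (Y d1 d2 : Int) (hY : 0 < Y) (h1 : 0 < d1) (hlt : d1 < d2)
    (hd1 : d1 ∣ Y) (hd2 : d2 ∣ Y) : Y / d2 < Y / d1 := by
  have h2 : 0 < d2 := lt_trans h1 hlt
  have q1 : d1 * (Y / d1) = Y := Int.mul_ediv_cancel' hd1
  have q2 : d2 * (Y / d2) = Y := Int.mul_ediv_cancel' hd2
  have e1pos : 0 < Y / d1 := cof_pos Y d1 hY h1 hd1
  have e2pos : 0 < Y / d2 := cof_pos Y d2 hY h2 hd2
  by_contra h
  rw [not_lt] at h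
  nlinarith

lemma large_gt_s (Y d : Int) (hY : 0 < Y) (hd : 0 < d) (hds : d ≤ ppS Y)
    (hdvd : d ∣ Y) (hne : d ≠ Y / d) : ppS Y < Y / d := by
  have hdd : d * d ≤ Y := (le_s_iff Y d hY hd.le).mp hds
  have hmul : d * (Y / d) = Y := Int.mul_ediv_cancel' hdvd
  have hepos : 0 < Y / d := cof_pos Y d hY hd hdvd
  have hed : d < Y / d := by
    by_cases h : d < Y / d
    · exact h
    · rw [not_lt] at h
      exact absurd (le_antisymm (by nlinarith) h) hne
  by_contra h
  rw [not_lt] at h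
  have : Y / d * (Y / d) ≤ Y := (le_s_iff Y (Y / d) hY hepos.le).mp h
  nlinarith

lemma pw_keys (Y a b : Int) (c : Int → Bool) :
    (((PySem.List.pyRange a b 1).filter c).map (fun d => (d, ppCof Y d))).Pairwise
      (fun p q : Int × Int => p.1 < q.1) := by
  rw [List.pairwise_map]
  exact (PySem.List.pairwise_lt_pyRange_one a b).filter c

lemma pw_large (Y : Int) (hY : 0 < Y) :
    (ppLarge Y).Pairwise (fun p q : Int × Int => q.1 < p.1) := by
  rw [ppLarge, List.pairwise_map]
  refine ((PySem.List.pairwise_lt_pyRange_one 1 (ppS Y + 1)).filter (ppCondL Y)).imp_of_mem ?_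
  intro a b ha hb hlt
  obtain ⟨hra, hca⟩ := List.mem_filter.mp ha
  obtain ⟨hrb, hcb⟩ := List.mem_filter.mp hb
  obtain ⟨ha1, _⟩ := PySem.List.mem_pyRange_one.mp hra
  obtain ⟨hb1, _⟩ := PySem.List.mem_pyRange_one.mp hrb
  have hadvd : a ∣ Y := ((cond_iff Y a (by omega)).mp (by
    simp only [ppCondL, Bool.and_eq_true] at hca; exact hca.1)).1
  have hbdvd : b ∣ Y := ((cond_iff Y b (by omega)).mp (by
    simp only [ppCondL, Bool.and_eq_true] at hcb; exact hcb.1)).1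
  simp only [ppCof, cof_eq Y a (by omega), cof_eq Y b (by omega)]
  exact cof_anti Y a b hY (by omega) hlt hadvd hbdvd

lemma mem_split (Y : Int) (hY : 0 < Y) (p : Int × Int) :
    p ∈ ppAll Y ↔ p ∈ ppSmall Y ++ (ppLarge Y).reverse := by
  simp only [ppAll, ppSmall, ppLarge, List.mem_append, List.mem_reverse, List.mem_map,
    List.mem_filter, PySem.List.mem_pyRange_one]
  constructor
  · rintro ⟨d, ⟨⟨hd1, hd2⟩, hc⟩, rfl⟩
    have hd0 : 0 < d := by omega
    obtain ⟨hdvd, hgcd⟩ := (cond_iff Y d hd0).mp hc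
    by_cases hds : d ≤ ppS Y
    · exact Or.inl ⟨d, ⟨⟨hd1, by omega⟩, hc⟩, rfl⟩
    · right
      have hepos : 0 < Y / d := cof_pos Y d hY hd0 hdvd
      have hedvd : Y / d ∣ Y := cof_dvd Y d hd0 hdvd
      have hcc : Y / (Y / d) = d := cof_cof Y d hY hd0 hdvd
      have hdd : ¬ d * d ≤ Y := fun h => hds ((le_s_iff Y d hY hd0.le).mpr h)
      have hmul : d * (Y / d) = Y := Int.mul_ediv_cancel' hdvd
      have hed : Y / d < d := by nlinarith
      have hes : Y / d ≤ ppS Y := (le_s_iff Y (Y / d) hY hepos.le).mpr (by nlinarith)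
      have hce : ppCond Y (Y / d) = true := (cond_iff Y (Y / d) hepos).mpr
        ⟨hedvd, by rw [hcc, Int.gcd_comm]; exact hgcd⟩
      refine ⟨Y / d, ⟨⟨by omega, by omega⟩, ?_⟩, ?_⟩
      · simp only [ppCondL, hce, Bool.true_and, decide_eq_true_eq, ppCof,
          cof_eq Y (Y / d) hepos, hcc]
        omega
      · simp [ppCof, cof_eq Y (Y / d) hepos, cof_eq Y d hd0, hcc]
  · rintro (⟨d, ⟨⟨hd1, hd2⟩, hc⟩, rfl⟩ | ⟨d, ⟨⟨hd1, hd2⟩, hc⟩, rfl⟩)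
    · have hd0 : 0 < d := by omega
      obtain ⟨hdvd, _⟩ := (cond_iff Y d hd0).mp hc
      exact ⟨d, ⟨⟨hd1, by have := Int.le_of_dvd hY hdvd; omega⟩, hc⟩, rfl⟩
    · have hd0 : 0 < d := by omega
      have hc' : ppCond Y d = true := by
        simp only [ppCondL, Bool.and_eq_true] at hc; exact hc.1
      obtain ⟨hdvd, hgcd⟩ := (cond_iff Y d hd0).mp hc'
      have hepos : 0 < Y / d := cof_pos Y d hY hd0 hdvd
      have hedvd : Y / d ∣ Y := cof_dvd Y d hd0 hdvd
      have hcc : Y / (Y / d) = d := cof_cof Y d hY hd0 hdvd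
      have hle : Y / d ≤ Y := Int.le_of_dvd hY hedvd
      have hce : ppCond Y (Y / d) = true := (cond_iff Y (Y / d) hepos).mpr
        ⟨hedvd, by rw [hcc, Int.gcd_comm]; exact hgcd⟩
      refine ⟨Y / d, ⟨⟨by omega, by omega⟩, hce⟩, ?_⟩
      simp [ppCof, cof_eq Y (Y / d) hepos, cof_eq Y d hd0, hcc]

lemma main_eq (Y : Int) (hY : 0 < Y) : ppAll Y = ppSmall Y ++ (ppLarge Y).reverse := by
  have pwAll : (ppAll Y).Pairwise (fun p q : Int × Int => p.1 < q.1) := pw_keys Y 1 (Y + 1) _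
  have pwB : (ppSmall Y ++ (ppLarge Y).reverse).Pairwise (fun p q : Int × Int => p.1 < q.1) := by
    rw [List.pairwise_append]
    refine ⟨pw_keys Y 1 (ppS Y + 1) _, List.pairwise_reverse.mpr (pw_large Y hY), ?_⟩
    intro p hp q hq
    simp only [ppSmall, ppLarge, List.mem_reverse, List.mem_map, List.mem_filter,
      PySem.List.mem_pyRange_one] at hp hq
    obtain ⟨d, ⟨⟨hd1, hd2⟩, hc⟩, rfl⟩ := hp
    obtain ⟨e, ⟨⟨he1, he2⟩, hce⟩, rfl⟩ := hq
    have hce' : ppCond Y e = true := by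
      simp only [ppCondL, Bool.and_eq_true] at hce; exact hce.1
    have hne : e ≠ ppCof Y e := by
      simp only [ppCondL, Bool.and_eq_true, decide_eq_true_eq] at hce; exact hce.2
    have hedvd : e ∣ Y := ((cond_iff Y e (by omega)).mp hce').1
    have := large_gt_s Y e hY (by omega) (by omega) hedvd (by
      rwa [← cof_eq Y e (by omega)])
    simp only [ppCof, cof_eq Y e (by omega)]
    omega
  have ndAll : (ppAll Y).Nodup := pwAll.imp (fun h => by
    intro heq; rw [heq] at h; exact lt_irrefl _ h)
  have ndB : (ppSmall Y ++ (ppLarge Y).reverse).Nodup := pwB.imp (fun h => by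
    intro heq; rw [heq] at h; exact lt_irrefl _ h)
  have hperm : (ppAll Y).Perm (ppSmall Y ++ (ppLarge Y).reverse) :=
    (List.perm_ext_iff_of_nodup ndAll ndB).mpr (mem_split Y hY)
  exact hperm.eq_of_pairwise
    (fun a b _ _ h1 h2 => absurd (lt_trans h1 h2) (lt_irrefl _)) pwAll pwB

-- ===== VERDICT (by name: the statement is the Claim_ definition above) =====
theorem prime_pairs_spec : Claim_equal_prime_pairs := by
  intro Y _
  unfold Spec_prime_pairs
  by_cases hY : Y ≤ 0
  · rw [prime_pairs, PySem.List.pyRange_one_eq_nil (by omega), prime_pairs_alt, if_pos hY]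
    rfl
  · rw [prime_pairs_eq_filter, prime_pairs_alt_eq_filter Y (by omega)]
    exact main_eq Y (by omega)
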